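-- pv_equiv track=rewrite | github.com/eigentaylor/margin-matters | build_site1.py | group_by_abbr
-- ===== SOURCE A (Python) =====
-- from collections import defaultdict
--
-- def group_by_abbr(rows):
--     g = defaultdict(list)
--     for r in rows:
--         abbr = r.get("abbr","").strip()
--         if abbr:
--             g[abbr].append(r)
--     # sort each group by year (if convertible)
--     for k in g:
--         g[k].sort(key=lambda r: int(r.get("year", 0)))
--     return g
-- ===== SOURCE B (Python) =====
-- def group_by_abbr(rows):
--     tagged = [(r.get("abbr", "").strip(), r) for r in rows]
--     tagged = [t for t in tagged if t[0]]
--     g = {}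
--     for a, _ in tagged:
--         g.setdefault(a, [])
--     for a, r in sorted(tagged, key=lambda t: int(t[1].get("year", 0))):
--         g[a].append(r)
--     return g
-- ===== Notes on version B (the rewrite author's own statement) =====
-- stated objective: alternative
-- what changed: A groups rows by abbr first and then sorts each group's list separately; B filters the abbr-bearing rows, performs ONE stable global sort by year over all of them, and then groups the already-sorted rows in a single pass (keys pre-seeded in first-appearance order), relying on sort stability for identical tie order.
import Mathlib
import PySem

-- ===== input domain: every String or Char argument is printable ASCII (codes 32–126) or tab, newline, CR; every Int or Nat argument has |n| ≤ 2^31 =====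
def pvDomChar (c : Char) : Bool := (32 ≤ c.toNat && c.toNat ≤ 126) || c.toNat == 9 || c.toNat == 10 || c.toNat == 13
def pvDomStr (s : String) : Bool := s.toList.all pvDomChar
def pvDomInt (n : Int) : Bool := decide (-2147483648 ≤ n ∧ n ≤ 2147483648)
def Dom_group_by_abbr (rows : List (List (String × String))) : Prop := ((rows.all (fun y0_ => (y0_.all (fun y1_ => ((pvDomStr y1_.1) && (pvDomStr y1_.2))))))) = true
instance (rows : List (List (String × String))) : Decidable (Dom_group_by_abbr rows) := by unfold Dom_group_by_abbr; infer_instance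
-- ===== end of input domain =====

-- B replaces A's "group by abbr, then sort each group" with "one stable global sort by year,
-- then group in a single pass" (alternative decomposition, same asymptotic cost).


-- ===== PORT A =====
-- r.get(k, dflt) on a Python dict r (assoc list; duplicate keys overwrite, Python dict construction)
def pvRowGet (r : List (String × String)) (k : String) : Option String :=
  (PySem.Dict.ofList r).get? k

-- int(r.get("year", 0)); Pre_ guarantees ofStr? succeeds when the row is grouped
def pvYear (r : List (String × String)) : Int :=
  match pvRowGet r "year" with
  | none => 0
  | some s => (PySem.Int.ofStr? s).getD 0

def group_by_abbr (rows : List (List (String × String))) : List (String × List (List (String × String))) :=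
  let g := rows.foldl (fun d r =>
      let abbr := PySem.Str.strip ((pvRowGet r "abbr").getD "")
      if abbr ≠ "" then d.modify abbr [] (fun x => x ++ [r]) else d)
    PySem.Dict.empty
  -- for k in g: g[k].sort(key=...)  (each value sorted in place, key order kept); return g
  g.items.map (fun kv => (kv.1, PySem.List.sorted kv.2 pvYear false))

-- ===== PORT B =====
def group_by_abbr_alt (rows : List (List (String × String))) : List (String × List (List (String × String))) :=
  let tagged := (rows.map (fun r => (PySem.Str.strip ((pvRowGet r "abbr").getD ""), r))).filter
      (fun t => t.1 != "")
  let g0 := tagged.foldl (fun d t => d.setdefault t.1 []) PySem.Dict.empty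
  let g := (PySem.List.sorted tagged (fun t => pvYear t.2) false).foldl
      (fun d p => d.modify p.1 [] (fun x => x ++ [p.2])) g0
  g.items

-- ===== PRECONDITION & SPEC =====
-- Pre_ excludes exactly the inputs where Python raises ValueError: a row with a non-empty
-- stripped "abbr" whose "year" string is not int()-convertible (both A and B raise there).
def Pre_group_by_abbr (rows : List (List (String × String))) : Prop :=
  ∀ r ∈ rows, PySem.Str.strip (((PySem.Dict.ofList r).get? "abbr").getD "") ≠ "" →
    ∀ s, (PySem.Dict.ofList r).get? "year" = some s → (PySem.Int.ofStr? s).isSome = true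
instance (rows : List (List (String × String))) : Decidable (Pre_group_by_abbr rows) := by unfold Pre_group_by_abbr; infer_instance

def pvWitness_group_by_abbr : (List (List (String × String))) :=
  [[("abbr", " CA "), ("year", "1992")], [("abbr", "CA"), ("year", "88")], [("abbr", ""), ("year", "zz")], [("abbr", "TX")]]

def Spec_group_by_abbr (rows : List (List (String × String))) (out : List (String × List (List (String × String)))) : Prop := out = group_by_abbr_alt rows
instance (rows : List (List (String × String))) (out : List (String × List (List (String × String)))) : Decidable (Spec_group_by_abbr rows out) := by unfold Spec_group_by_abbr; infer_instance

-- ===== CLAIM (what is proved, stated in full; the proofs are below) =====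
def Claim_equal_group_by_abbr : Prop := ∀ (rows : List (List (String × String))), Dom_group_by_abbr rows → Pre_group_by_abbr rows → Spec_group_by_abbr rows (group_by_abbr rows)

-- ===== LEMMAS AND PROOFS =====

theorem pv_insertBy_nil {α : Type} (b : α → α → Bool) (x : α) :
    PySem.List.insertBy b x [] = [x] := rfl

theorem pv_insertBy_cons {α : Type} (b : α → α → Bool) (x y : α) (ys : List α) :
    PySem.List.insertBy b x (y :: ys) =
      if b x y then x :: y :: ys else y :: PySem.List.insertBy b x ys := rfl

-- insertBy puts x first when x is strictly below everything
theorem pv_insertBy_head {α κ : Type} [LinearOrder κ] (K : α → κ) (x : α) (l : List α)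
    (h : ∀ z ∈ l, K x < K z) :
    PySem.List.insertBy (fun a b => decide (K a < K b)) x l = x :: l := by
  cases l with
  | nil => rfl
  | cons y ys => simp [pv_insertBy_cons, h y (by simp)]

theorem pv_filter_insertBy {α κ : Type} [LinearOrder κ] (K : α → κ) (p : α → Bool) (x : α)
    (acc : List α) (h : acc.Pairwise (fun a b => K a ≤ K b)) :
    (PySem.List.insertBy (fun a b => decide (K a < K b)) x acc).filter p =
      if p x then PySem.List.insertBy (fun a b => decide (K a < K b)) x (acc.filter p)
      else acc.filter p := by
  induction acc with
  | nil => simp only [pv_insertBy_nil, List.filter]; split <;> simp_all [pv_insertBy_nil]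
  | cons y ys ih =>
    rw [List.pairwise_cons] at h
    rw [pv_insertBy_cons]
    by_cases hlt : K x < K y
    · rw [if_pos (by simpa using hlt)]
      have hall : ∀ z ∈ (y :: ys).filter p, K x < K z := by
        intro z hz
        have hz' := List.mem_of_mem_filter hz
        rcases List.mem_cons.mp hz' with rfl | hz''
        · exact hlt
        · exact lt_of_lt_of_le hlt (h.1 z hz'')
      rw [pv_insertBy_head K x _ hall]
      by_cases hp : p x = true <;> simp [List.filter_cons, hp]
    · rw [if_neg (by simpa using hlt)]
      rw [List.filter_cons, ih h.2]
      by_cases hp : p y = true <;> by_cases hx : p x = true <;>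
        simp [List.filter_cons, hp, hx, pv_insertBy_cons, hlt]

theorem pv_sorted_append_singleton {α κ : Type} [LinearOrder κ] (K : α → κ) (l : List α) (x : α) :
    PySem.List.sorted (l ++ [x]) K false =
      PySem.List.insertBy (fun a b => decide (K a < K b)) x (PySem.List.sorted l K false) := by
  rw [PySem.List.sorted_eq_foldl_insertBy, PySem.List.sorted_eq_foldl_insertBy, List.foldl_append]
  rfl

theorem pv_filter_sorted {α κ : Type} [LinearOrder κ] (K : α → κ) (p : α → Bool) (ts : List α) :
    (PySem.List.sorted ts K false).filter p = PySem.List.sorted (ts.filter p) K false := by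
  induction ts using List.reverseRecOn with
  | nil => rfl
  | append_singleton ts x ih =>
    rw [pv_sorted_append_singleton, pv_filter_insertBy K p x _ (PySem.List.sorted_pairwise ts K), ih,
      List.filter_append]
    by_cases hx : p x = true
    · simp only [hx, if_true, List.filter_cons, List.filter_nil]
      rw [pv_sorted_append_singleton]
    · simp [hx]

theorem pv_map_insertBy {α β κ : Type} [LinearOrder κ] (K : β → κ) (t : α × β) (acc : List (α × β)) :
    (PySem.List.insertBy (fun a b => decide (K a.2 < K b.2)) t acc).map Prod.snd =
      PySem.List.insertBy (fun a b => decide (K a < K b)) t.2 (acc.map Prod.snd) := by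
  induction acc with
  | nil => rfl
  | cons y ys ih =>
    simp only [pv_insertBy_cons, List.map_cons]
    by_cases hlt : K t.2 < K y.2 <;> simp [hlt, ih]

theorem pv_map_snd_sorted {α β κ : Type} [LinearOrder κ] (K : β → κ) (ts : List (α × β)) :
    (PySem.List.sorted ts (fun t => K t.2) false).map Prod.snd =
      PySem.List.sorted (ts.map Prod.snd) K false := by
  induction ts using List.reverseRecOn with
  | nil => rfl
  | append_singleton ts x ih =>
    rw [pv_sorted_append_singleton (fun t => K t.2) ts x]
    rw [pv_map_insertBy, ih, List.map_append, List.map_singleton,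
      pv_sorted_append_singleton K (List.map Prod.snd ts) x.2]

theorem pv_foldA_tagged (rows : List (List (String × String)))
    (d : PySem.Dict String (List (List (String × String)))) :
    rows.foldl (fun d r =>
        let abbr := PySem.Str.strip ((pvRowGet r "abbr").getD "")
        if abbr ≠ "" then d.modify abbr [] (fun x => x ++ [r]) else d) d =
      ((rows.map (fun r => (PySem.Str.strip ((pvRowGet r "abbr").getD ""), r))).filter
          (fun t => t.1 != "")).foldl (fun d p => d.modify p.1 [] (fun x => x ++ [p.2])) d := by
  induction rows generalizing d with
  | nil => rfl
  | cons r rs ih =>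
    simp only [List.foldl_cons, List.map_cons, List.filter_cons]
    by_cases h : PySem.Str.strip ((pvRowGet r "abbr").getD "") = ""
    · simp only [h]
      rw [if_neg (by simp), if_neg (by simp)]
      exact ih _
    · rw [if_pos h, if_pos (by simpa using h)]
      simp only [List.foldl_cons]
      exact ih _

theorem pv_setdefault_keys {β : Type} (k : β → String) (l : List β)
    (d : PySem.Dict String (List (List (String × String)))) :
    (l.foldl (fun d t => d.setdefault (k t) []) d).keys = PySem.Set.update d.keys (l.map k) := by
  induction l generalizing d with
  | nil => rfl
  | cons t ts ih =>
    simp only [List.foldl_cons, List.map_cons, PySem.Set.update_cons]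
    rw [ih]
    congr 1
    rw [PySem.Dict.keys_setdefault]
    unfold PySem.Set.add PySem.Set.contains
    rw [PySem.Dict.contains_eq_decide_mem_keys]
    by_cases hm : k t ∈ d.keys <;> simp [hm]

theorem pv_setdefault_getD {β : Type} (k : β → String) (l : List β)
    (d : PySem.Dict String (List (List (String × String)))) (c : String) :
    (l.foldl (fun d t => d.setdefault (k t) []) d).getD c [] = d.getD c [] := by
  induction l generalizing d with
  | nil => rfl
  | cons t ts ih =>
    simp only [List.foldl_cons]
    rw [ih]
    by_cases hc : c = k t
    · subst hc; exact PySem.Dict.getD_setdefault_self d (k t) [] []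
    · rw [PySem.Dict.getD_eq_get?_getD, PySem.Dict.get?_setdefault_of_ne d [] hc,
        PySem.Dict.getD_eq_get?_getD]

theorem pv_set_update_self (S : PySem.Set String) (L : List String)
    (h : ∀ y ∈ L, y ∈ S) : PySem.Set.update S L = S := by
  rw [PySem.Set.update_eq_append_filter]
  have : List.filter (fun y => !S.contains y) (PySem.Set.ofList L) = [] := by
    rw [List.filter_eq_nil_iff]
    intro y hy
    have : y ∈ S := h y ((PySem.Set.mem_ofList L y).mp hy)
    simp [PySem.Set.contains, List.contains_iff_mem, this]
  rw [this, List.append_nil]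

theorem pv_main_eq (rows : List (List (String × String))) :
    (let g := rows.foldl (fun d r =>
        let abbr := PySem.Str.strip ((pvRowGet r "abbr").getD "")
        if abbr ≠ "" then d.modify abbr [] (fun x => x ++ [r]) else d)
      PySem.Dict.empty
     g.items.map (fun kv => (kv.1, PySem.List.sorted kv.2 pvYear false))) =
    (let tagged := (rows.map (fun r => (PySem.Str.strip ((pvRowGet r "abbr").getD ""), r))).filter
        (fun t => t.1 != "")
     let g0 := tagged.foldl (fun d t => d.setdefault t.1 []) PySem.Dict.empty
     let g := (PySem.List.sorted tagged (fun t => pvYear t.2) false).foldl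
        (fun d p => d.modify p.1 [] (fun x => x ++ [p.2])) g0
     g.items) := by
  simp only []
  rw [pv_foldA_tagged]
  set tagged := (rows.map (fun r => (PySem.Str.strip ((pvRowGet r "abbr").getD ""), r))).filter
      (fun t => t.1 != "") with htagged
  set g0 := tagged.foldl (fun d t => d.setdefault t.1 []) PySem.Dict.empty with hg0
  set st := PySem.List.sorted tagged (fun t => pvYear t.2) false with hst
  set gA := tagged.foldl (fun d p => d.modify p.1 [] (fun x => x ++ [p.2])) PySem.Dict.empty with hgA
  set gB := st.foldl (fun d p => d.modify p.1 [] (fun x => x ++ [p.2])) g0 with hgB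
  -- keys
  have hg0keys : g0.keys = PySem.Set.ofList (tagged.map Prod.fst) := by
    rw [hg0, pv_setdefault_keys Prod.fst tagged PySem.Dict.empty, PySem.Dict.keys_empty,
      PySem.Set.update_nil_left]
  have hg0nodup : g0.keys.Nodup := by rw [hg0keys]; exact PySem.Set.nodup_ofList _
  have hAkeys : gA.keys = PySem.Set.ofList (tagged.map Prod.fst) := by
    rw [hgA, PySem.Dict.keys_foldl_modify_key tagged Prod.fst [] (fun _ p v => v ++ [p.2])
      PySem.Dict.empty, PySem.Dict.keys_empty, PySem.Set.update_nil_left]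
  have hBkeys : gB.keys = PySem.Set.ofList (tagged.map Prod.fst) := by
    rw [hgB, PySem.Dict.keys_foldl_modify_key st Prod.fst [] (fun _ p v => v ++ [p.2]) g0, hg0keys]
    apply pv_set_update_self
    intro y hy
    rcases List.mem_map.mp hy with ⟨t, ht, rfl⟩
    rw [hst, PySem.List.mem_sorted] at ht
    exact (PySem.Set.mem_ofList _ _).mpr (List.mem_map.mpr ⟨t, ht, rfl⟩)
  have hAnodup : gA.keys.Nodup := by rw [hAkeys]; exact PySem.Set.nodup_ofList _
  have hBnodup : gB.keys.Nodup := by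
    rw [hgB]
    exact PySem.Dict.nodup_keys_foldl_modify_key st Prod.fst [] (fun _ p v => v ++ [p.2]) g0 hg0nodup
  -- values
  have hval : ∀ c, PySem.List.sorted (gA.getD c []) pvYear false = gB.getD c [] := by
    intro c
    rw [hgA, PySem.Dict.getD_foldl_modify_append tagged PySem.Dict.empty c, PySem.Dict.getD_empty,
      List.nil_append]
    rw [hgB, PySem.Dict.getD_foldl_modify_append st g0 c, hg0, pv_setdefault_getD Prod.fst tagged
      PySem.Dict.empty c, PySem.Dict.getD_empty, List.nil_append]
    rw [hst, pv_filter_sorted (fun t => pvYear t.2) (fun p => p.1 == c) tagged,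
      pv_map_snd_sorted pvYear (tagged.filter (fun p => p.1 == c))]
  -- assemble
  rw [PySem.Dict.items_eq_map_keys gA hAnodup [], PySem.Dict.items_eq_map_keys gB hBnodup [],
    List.map_map, hAkeys, hBkeys]
  apply List.map_congr_left
  intro k _
  simp only [Function.comp]
  rw [hval k]

-- ===== VERDICT (by name: the statement is the Claim_ definition above) =====
theorem group_by_abbr_spec : Claim_equal_group_by_abbr := by
  intro rows _ _
  exact pv_main_eq rows
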